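-- pv_equiv track=rewrite | github.com/jbuklis1/compatibility-checker-api | app/templates/__init__.py | _looks_like_numbered_list
-- ===== SOURCE A (Python) =====
-- def _looks_like_numbered_list(block: str) -> bool:
--     """True if block appears to be a numbered list (e.g. 1. ... 2. ...)."""
--     lines = [ln.strip() for ln in block.split("\n") if ln.strip()]
--     if not lines:
--         return False
--     for line in lines:
--         i = 0
--         while i < len(line) and line[i] in "0123456789":
--             i += 1
--         if i == 0 or i >= len(line) or line[i] != "." or (i + 1 < len(line) and not line[i + 1].isspace()):
--             return False
--     return True
-- ===== SOURCE B (Python) =====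
-- def _looks_like_numbered_list(block: str) -> bool:
--     """True if block appears to be a numbered list (e.g. 1. ... 2. ...)."""
--     lines = [s for s in (ln.strip() for ln in block.split("\n")) if s]
--     return bool(lines) and all(_numbered_line(s) for s in lines)
--
--
-- def _numbered_line(line: str) -> bool:
--     head, sep, tail = line.partition(".")
--     return (sep == "."
--             and head != ""
--             and all(c in "0123456789" for c in head)
--             and (tail == "" or tail[0].isspace()))
-- ===== Notes on version B (the rewrite author's own statement) =====
-- stated objective: simpler
-- what changed: Replaces the hand-rolled index/while digit scan and the negated four-clause failure test with str.partition at the first dot and a positive per-line predicate (nonempty all-ASCII-digit head, separator present, tail empty or starting with whitespace) combined via all().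
import Mathlib
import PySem

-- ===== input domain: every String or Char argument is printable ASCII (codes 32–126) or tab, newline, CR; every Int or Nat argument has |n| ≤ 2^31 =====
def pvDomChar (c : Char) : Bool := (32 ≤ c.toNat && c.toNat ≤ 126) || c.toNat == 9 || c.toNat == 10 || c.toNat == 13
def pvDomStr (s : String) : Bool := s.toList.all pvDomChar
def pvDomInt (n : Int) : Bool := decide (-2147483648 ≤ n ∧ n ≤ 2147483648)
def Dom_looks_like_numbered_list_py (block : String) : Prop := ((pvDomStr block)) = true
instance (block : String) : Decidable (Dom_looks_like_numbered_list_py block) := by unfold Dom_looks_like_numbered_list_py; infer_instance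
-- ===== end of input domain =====

-- B replaces A's index-based while-scan and negated failure chain with a partition on "." and a
-- positive per-line predicate (objective: simpler decomposition, same cost).

-- ===== PORT A =====
def pvDigits : List Char := ['0','1','2','3','4','5','6','7','8','9']

-- the while loop: i = number of leading chars of line that are in "0123456789"
def aScan : List Char → Nat
  | [] => 0
  | c :: t => if pvDigits.contains c then aScan t + 1 else 0

-- A's per-line failure test (the body of the if inside the for loop); line[i] / line[i+1] are
-- guarded by the preceding length tests exactly as in the Python, so getD is exact here
def aLineFail (line : List Char) : Bool :=
  let i := aScan line
  decide (i = 0) || decide (line.length ≤ i) || (line.getD i ' ' != '.') ||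
    (decide (i + 1 < line.length) && !(PySem.Chars.isspace (line.getD (i + 1) ' ')))

def looks_like_numbered_list_py (block : String) : Bool :=
  let lines := (PySem.Chars.splitOn block.toList ['\n']).filterMap
    (fun ln => let s := PySem.Chars.strip ln; if s = [] then none else some s)
  if lines = [] then false
  else lines.all (fun line => !(aLineFail line))  -- 'for …: if fail: return False / return True'

-- ===== PORT B =====
-- line.partition(".") for the one-char separator ".": head = takeWhile (· ≠ '.'),
-- sep ++ tail = dropWhile (· ≠ '.') (exact: partition splits at the first occurrence)
def bLineOk (line : List Char) : Bool :=
  let head := line.takeWhile (fun c => c ≠ '.')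
  match line.dropWhile (fun c => c ≠ '.') with
  | [] => false            -- sep ≠ "."
  | _ :: tail =>
    !head.isEmpty && head.all (fun c => pvDigits.contains c) &&
      (match tail with
       | [] => true
       | d :: _ => PySem.Chars.isspace d)

def looks_like_numbered_list_py_alt (block : String) : Bool :=
  let lines := ((PySem.Chars.splitOn block.toList ['\n']).map PySem.Chars.strip).filter
    (fun s => s ≠ [])
  decide (lines ≠ []) && lines.all bLineOk

-- ===== PRECONDITION & SPEC =====
def Spec_looks_like_numbered_list_py (block : String) (out : Bool) : Prop := out = looks_like_numbered_list_py_alt block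
instance (block : String) (out : Bool) : Decidable (Spec_looks_like_numbered_list_py block out) := by unfold Spec_looks_like_numbered_list_py; infer_instance

-- ===== CLAIM (what is proved, stated in full; the proofs are below) =====
def Claim_equal_looks_like_numbered_list_py : Prop := ∀ (block : String), Dom_looks_like_numbered_list_py block → Spec_looks_like_numbered_list_py block (looks_like_numbered_list_py block)

-- ===== LEMMAS AND PROOFS =====

-- A's failure test with the 'i = 0' clause dropped (what remains of aLineFail after consuming
-- one leading digit)
def aTailFail (t : List Char) : Bool :=
  let i := aScan t
  decide (t.length ≤ i) || (t.getD i ' ' != '.') ||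
    (decide (i + 1 < t.length) && !(PySem.Chars.isspace (t.getD (i + 1) ' ')))

-- B's per-line test with the 'head nonempty' clause dropped
def bTailOk (t : List Char) : Bool :=
  match t.dropWhile (fun c => c ≠ '.') with
  | [] => false
  | _ :: tail =>
    (t.takeWhile (fun c => c ≠ '.')).all (fun c => pvDigits.contains c) &&
      (match tail with
       | [] => true
       | d :: _ => PySem.Chars.isspace d)

theorem aLineFail_cons_digit (c : Char) (t : List Char) (hc : c ∈ pvDigits) :
    aLineFail (c :: t) = aTailFail t := by
  simp [aLineFail, aTailFail, aScan, hc]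

theorem aTailFail_cons_digit (c : Char) (t : List Char) (hc : c ∈ pvDigits) :
    aTailFail (c :: t) = aTailFail t := by
  simp [aTailFail, aScan, hc]

theorem digit_ne_dot {c : Char} (hc : c ∈ pvDigits) : c ≠ '.' := by
  fin_cases hc <;> decide

theorem bTail_eq : ∀ t : List Char, bTailOk t = !aTailFail t := by
  intro t
  induction t with
  | nil => decide
  | cons c r ih =>
    by_cases hc : c ∈ pvDigits
    · have hne : c ≠ '.' := digit_ne_dot hc
      rw [aTailFail_cons_digit c r hc, ← ih]
      simp [bTailOk, hne, hc]
    · by_cases hd : c = '.'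
      · subst hd
        cases r with
        | nil => decide
        | cons d r' =>
          simp [bTailOk, aTailFail, aScan, List.dropWhile, List.takeWhile,
            show ¬('.' ∈ pvDigits) by decide]
      · cases hdw : List.dropWhile (fun x => !decide (x = '.')) r with
        | nil => simp [bTailOk, aTailFail, aScan, hc, hd, hdw]
        | cons e s => simp [bTailOk, aTailFail, aScan, hc, hd, hdw]

theorem line_eq (line : List Char) : bLineOk line = !aLineFail line := by
  cases line with
  | nil => decide
  | cons c t =>
    by_cases hc : c ∈ pvDigits
    · have hne : c ≠ '.' := digit_ne_dot hc
      rw [aLineFail_cons_digit c t hc, ← bTail_eq t]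
      simp [bLineOk, bTailOk, hne, hc]
    · by_cases hd : c = '.'
      · subst hd
        simp [bLineOk, aLineFail, aScan, List.dropWhile,
          show ¬('.' ∈ pvDigits) by decide]
      · cases hdw : List.dropWhile (fun x => !decide (x = '.')) t with
        | nil => simp [bLineOk, aLineFail, aScan, hc, hd, hdw]
        | cons e s => simp [bLineOk, aLineFail, aScan, hc, hd, hdw]

theorem lines_eq (ls : List (List Char)) :
    ls.filterMap (fun ln => let s := PySem.Chars.strip ln; if s = [] then none else some s)
      = (ls.map PySem.Chars.strip).filter (fun s => s ≠ []) := by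
  induction ls with
  | nil => rfl
  | cons l ls ih =>
    simp only [List.filterMap_cons, List.map_cons, List.filter_cons]
    by_cases h : PySem.Chars.strip l = [] <;> simp [h, ih]

-- ===== VERDICT (by name: the statement is the Claim_ definition above) =====
theorem looks_like_numbered_list_py_spec : Claim_equal_looks_like_numbered_list_py := by
  intro block _
  show looks_like_numbered_list_py block = looks_like_numbered_list_py_alt block
  unfold looks_like_numbered_list_py looks_like_numbered_list_py_alt
  rw [lines_eq]
  set ls := ((PySem.Chars.splitOn block.toList ['\n']).map PySem.Chars.strip).filter
    (fun s => s ≠ []) with hls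
  by_cases h : ls = []
  · simp [h]
  · simp only [h, if_false, ne_eq, not_false_iff, decide_true, Bool.true_and]
    rw [show (fun line => !aLineFail line) = bLineOk from funext fun x => (line_eq x).symm]
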